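-- pv_equiv track=rewrite | github.com/dkettchen/gender_census_2024_data | src/sorting_q2_write_ins/sort_androgyny.py | is_androgyne
-- ===== SOURCE A (Python) =====
-- def is_androgynous(input_str:str):
--     """
--     takes a string
--
--     returns True if it denotes an alignment with androgynous expression
--
--     otherwise returns False
--     """
--     # making case insensitive
--     lower_str = input_str.lower()
--
--     result_bool = True
--
--     # excluding stuff
--     for item in [
--         "androgyne",
--         "androgyny",
--         "androygyne",
--         "andromorph",
--     ]:
--         if item in lower_str:
--             result_bool = False
--
--     for item in [
--         "(french)",
--         "/", # androgyne / androgynous cases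
--     ]:
--         if item in lower_str:
--             result_bool = True
--
--     return result_bool
--
-- def is_androgyne(input_str:str):
--     """
--     takes a string
--
--     returns True if the androgyne label is contained
--
--     otherwise returns False
--     """
--     # making case insensitive
--     lower_str = input_str.lower()
--
--     if is_androgynous(input_str) and "/" not in input_str:
--         return False
--
--     result_bool = True
--
--     # excluding stuff
--     for item in [
--         "androgyny",
--         "andromorph",
--     ]:
--         if item in lower_str:
--             result_bool = False
--
--     return result_bool
-- ===== SOURCE B (Python) =====
-- def is_androgyne(input_str: str):
--     """
--     takes a string
--
--     returns True if the androgyne label is contained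
--
--     otherwise returns False
--     """
--     low = input_str.lower()
--     pats = ["androgyne", "androgyny", "androygyne", "andromorph", "(french)", "/"]
--     found = [False] * 6
--     # one pass over positions, matching every pattern in place
--     for i in range(len(low)):
--         for k, p in enumerate(pats):
--             if not found[k] and low[i:i + len(p)] == p:
--                 found[k] = True
--     yne, yny, oyg, mor, fr, slash = found
--     androgynous = fr or slash or not (yne or yny or oyg or mor)
--     if androgynous and not slash:
--         return False
--     return not (yny or mor)
-- ===== Notes on version B (the rewrite author's own statement) =====
-- stated objective: alternative
-- what changed: Replaced the helper call and the two override loops of repeated 'in' substring tests by a single left-to-right position scan that matches all six patterns in place at once, then combines the six found-flags in one boolean formula.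
import Mathlib
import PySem

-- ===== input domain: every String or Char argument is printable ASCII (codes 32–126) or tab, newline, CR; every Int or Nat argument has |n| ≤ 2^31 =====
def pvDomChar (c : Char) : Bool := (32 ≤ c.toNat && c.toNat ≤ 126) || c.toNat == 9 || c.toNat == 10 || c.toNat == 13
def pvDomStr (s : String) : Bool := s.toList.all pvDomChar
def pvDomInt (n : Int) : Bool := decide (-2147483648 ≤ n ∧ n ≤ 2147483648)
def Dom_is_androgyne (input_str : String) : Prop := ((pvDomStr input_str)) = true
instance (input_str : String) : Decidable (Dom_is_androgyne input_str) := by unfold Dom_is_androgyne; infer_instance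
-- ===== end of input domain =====

-- B replaces the helper call and the two override loops of repeated substring tests by one
-- left-to-right position scan matching all six patterns in place, then one boolean formula
-- over the six found-flags (objective: alternative).

-- ===== PORT A =====
def is_androgynous (input_str : String) : Bool :=
  let lower_str := PySem.Str.lower input_str
  let result_bool := true
  let result_bool :=
    ["androgyne", "androgyny", "androygyne", "andromorph"].foldl
      (fun b item => if PySem.Str.isIn item lower_str then false else b) result_bool
  let result_bool :=
    ["(french)", "/"].foldl
      (fun b item => if PySem.Str.isIn item lower_str then true else b) result_bool
  result_bool

def is_androgyne (input_str : String) : Bool :=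
  let lower_str := PySem.Str.lower input_str
  if is_androgynous input_str && !(PySem.Str.isIn "/" input_str) then false
  else
    ["androgyny", "andromorph"].foldl
      (fun b item => if PySem.Str.isIn item lower_str then false else b) true

-- ===== PORT B =====
-- the position scan of Source B: at each suffix (= position i), each not-yet-found pattern is
-- compared against the window starting there (low[i:i+len(p)] == p ≈ isPrefixOf the suffix)
def pvScanB (l : List Char) (yne yny oyg mor fr slash : Bool) :
    Bool × Bool × Bool × Bool × Bool × Bool :=
  match l with
  | [] => (yne, yny, oyg, mor, fr, slash)
  | c :: rest =>
      pvScanB rest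
        (yne   || "androgyne".toList.isPrefixOf (c :: rest))
        (yny   || "androgyny".toList.isPrefixOf (c :: rest))
        (oyg   || "androygyne".toList.isPrefixOf (c :: rest))
        (mor   || "andromorph".toList.isPrefixOf (c :: rest))
        (fr    || "(french)".toList.isPrefixOf (c :: rest))
        (slash || "/".toList.isPrefixOf (c :: rest))

def is_androgyne_alt (input_str : String) : Bool :=
  let low := PySem.Str.lower input_str
  let (yne, yny, oyg, mor, fr, slash) :=
    pvScanB low.toList false false false false false false
  let androgynous := fr || slash || !(yne || yny || oyg || mor)
  if androgynous && !slash then false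
  else !(yny || mor)

-- ===== PRECONDITION & SPEC =====
def Spec_is_androgyne (input_str : String) (out : Bool) : Prop := out = is_androgyne_alt input_str
instance (input_str : String) (out : Bool) : Decidable (Spec_is_androgyne input_str out) := by unfold Spec_is_androgyne; infer_instance

-- ===== CLAIM (what is proved, stated in full; the proofs are below) =====
def Claim_equal_is_androgyne : Prop := ∀ (input_str : String), Dom_is_androgyne input_str → Spec_is_androgyne input_str (is_androgyne input_str)

-- ===== LEMMAS AND PROOFS =====

theorem pv_infix_step (p l : List Char) (c : Char) :
    decide (p <:+: c :: l) = (p.isPrefixOf (c :: l) || decide (p <:+: l)) := by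
  rw [Bool.eq_iff_iff]
  simp [List.infix_cons_iff, List.isPrefixOf_iff_prefix]

-- the scan computes, in each component, "initial flag OR pattern occurs in l"
theorem pvScanB_eq (l : List Char) (yne yny oyg mor fr slash : Bool) :
    pvScanB l yne yny oyg mor fr slash =
      (yne   || decide ("androgyne".toList <:+: l),
       yny   || decide ("androgyny".toList <:+: l),
       oyg   || decide ("androygyne".toList <:+: l),
       mor   || decide ("andromorph".toList <:+: l),
       fr    || decide ("(french)".toList <:+: l),
       slash || decide ("/".toList <:+: l)) := by
  induction l generalizing yne yny oyg mor fr slash with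
  | nil => simp [pvScanB]
  | cons c rest ih =>
      rw [pvScanB, ih]
      simp only [pv_infix_step, Bool.or_assoc]

theorem pv_isIn_eq_decide (p l : List Char) :
    PySem.Chars.isIn p l = decide (p <:+: l) := by
  rcases h : PySem.Chars.isIn p l with _ | _
  · rw [PySem.Chars.isIn_eq_false_iff] at h
    simp [h]
  · rw [PySem.Chars.isIn_iff_infix] at h
    simp [h]

theorem pv_toNat_ofNat (n : Nat) (h : n < 0xd800) : (Char.ofNat n).toNat = n := by
  unfold Char.ofNat Char.toNat
  split
  · rfl
  · next hn => exact absurd (Or.inl h) hn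

theorem pv_lowerChar_eq_slash_iff (c : Char) : PySem.Chars.lowerChar c = '/' ↔ c = '/' := by
  unfold PySem.Chars.lowerChar PySem.Chars.isupper
  split_ifs with h
  · simp only [Bool.and_eq_true, decide_eq_true_eq] at h
    have h65 : 65 ≤ c.toNat := h.1
    have h90 : c.toNat ≤ 90 := h.2
    constructor
    · intro hc
      have := congrArg Char.toNat hc
      rw [pv_toNat_ofNat _ (by omega)] at this
      have h47 : ('/' : Char).toNat = 47 := rfl
      omega
    · intro hc
      subst hc
      exact absurd h65 (by decide)
  · exact Iff.rfl

theorem pv_slash_lower (l : List Char) :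
    PySem.Chars.isIn ['/'] (PySem.Chars.lower l) = PySem.Chars.isIn ['/'] l := by
  rcases h : PySem.Chars.isIn ['/'] l with _ | _
  · rw [PySem.Chars.isIn_eq_false_iff] at h ⊢
    rw [List.singleton_infix_iff] at h ⊢
    simp only [PySem.Chars.lower, List.mem_map]
    rintro ⟨c, hc, hlc⟩
    exact h ((pv_lowerChar_eq_slash_iff c).mp hlc ▸ hc)
  · rw [PySem.Chars.isIn_iff_infix] at h ⊢
    rw [List.singleton_infix_iff] at h ⊢
    simpa only [PySem.Chars.lower, List.mem_map] using
      ⟨'/', h, (pv_lowerChar_eq_slash_iff '/').mpr rfl⟩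

-- ===== VERDICT (by name: the statement is the Claim_ definition above) =====
theorem is_androgyne_spec : Claim_equal_is_androgyne := by
  intro s _
  unfold Spec_is_androgyne is_androgyne is_androgyne_alt is_androgynous
  simp only [pvScanB_eq]
  simp only [List.foldl, PySem.Str.isIn, PySem.Str.toList_lower, ← pv_isIn_eq_decide]
  have hs : "/".toList = ['/'] := rfl
  rw [hs, pv_slash_lower]
  generalize PySem.Chars.isIn "androgyne".toList (PySem.Chars.lower s.toList) = c1
  generalize PySem.Chars.isIn "androgyny".toList (PySem.Chars.lower s.toList) = c2
  generalize PySem.Chars.isIn "androygyne".toList (PySem.Chars.lower s.toList) = c3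
  generalize PySem.Chars.isIn "andromorph".toList (PySem.Chars.lower s.toList) = c4
  generalize PySem.Chars.isIn "(french)".toList (PySem.Chars.lower s.toList) = c5
  generalize PySem.Chars.isIn ['/'] s.toList = c6
  cases c1 <;> cases c2 <;> cases c3 <;> cases c4 <;> cases c5 <;> cases c6 <;> rfl
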